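-- pv_equiv track=rewrite | github.com/davidestaub/BrainEncode | Code/feature_creation/extract_text_features.py | align_indices
-- ===== SOURCE A (Python) =====
-- from difflib import SequenceMatcher
--
-- def build_word_index_mapping(var_words: list[str],
--                              ref_words: list[str]) -> dict[int,int]:
--     """
--     Returns a dict mapping each index in var_words (0‑based) to the
--     matching index in ref_words (0‑based), wherever the SequenceMatcher
--     sees exact equality runs.
--     """
--     sm = SequenceMatcher(None, var_words, ref_words, autojunk=False)
--     mapping = {}
--     for tag, i1, i2, j1, j2 in sm.get_opcodes():
--         if tag == "equal":
--             for k in range(i2 - i1):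
--                 mapping[i1 + k] = j1 + k
--     return mapping
--
-- def align_indices(ref_words: list[str],
--                   var_words: list[str],
--                   var_EB: list[int]) -> list[int]:
--     """
--     Translate a list of event‑boundary indices var_EB, which are 1‑based
--     positions in var_words, into the corresponding 1‑based positions in ref_words.
--     """
--     # build the 0‑based mapping
--     mapping = build_word_index_mapping(var_words, ref_words)
--
--     aligned = []
--     for w in var_EB:
--         var_i = w - 1
--         ref_i = mapping.get(var_i)
--         if ref_i is not None:
--             # back to 1‑based
--             aligned.append(ref_i + 1)
--     return aligned
-- ===== SOURCE B (Python) =====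
-- def align_indices(ref_words: list[str],
--                   var_words: list[str],
--                   var_EB: list[int]) -> list[int]:
--     """
--     Translate 1-based event-boundary indices in var_words to 1-based positions
--     in ref_words by a per-query divide-and-conquer descent: instead of
--     precomputing all opcodes and expanding every equal run into a dict, each
--     query walks down the implicit matching tree, asking find_longest_match for
--     the current region and recursing into the side that can contain the index.
--     find_longest_match is inlined from difflib.SequenceMatcher (isjunk=None,
--     autojunk=False), since the matching itself must stay the stdlib's.
--     """
--     a, b = var_words, ref_words
--     b2j = {}
--     for idx, word in enumerate(b):
--         b2j.setdefault(word, []).append(idx)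
--
--     def find_longest_match(alo, ahi, blo, bhi):
--         # difflib.SequenceMatcher.find_longest_match, junk-free case
--         besti, bestj, bestsize = alo, blo, 0
--         j2len = {}
--         for i in range(alo, ahi):
--             newj2len = {}
--             for j in b2j.get(a[i], []):
--                 if j < blo:
--                     continue
--                 if j >= bhi:
--                     break
--                 k = newj2len[j] = j2len.get(j - 1, 0) + 1
--                 if k > bestsize:
--                     besti, bestj, bestsize = i - k + 1, j - k + 1, k
--             j2len = newj2len
--         while besti > alo and bestj > blo and a[besti - 1] == b[bestj - 1]:
--             besti, bestj, bestsize = besti - 1, bestj - 1, bestsize + 1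
--         while (besti + bestsize < ahi and bestj + bestsize < bhi
--                and a[besti + bestsize] == b[bestj + bestsize]):
--             bestsize += 1
--         return besti, bestj, bestsize
--
--     cache = {}          # memoizes the pure find_longest_match per region
--
--     def flm(alo, ahi, blo, bhi):
--         key = (alo, ahi, blo, bhi)
--         r = cache.get(key)
--         if r is None:
--             r = find_longest_match(alo, ahi, blo, bhi)
--             cache[key] = r
--         return r
--
--     out = []
--     n, m = len(a), len(b)
--     for w in var_EB:
--         x = w - 1
--         alo, ahi, blo, bhi = 0, n, 0, m
--         while True:
--             i, j, k = flm(alo, ahi, blo, bhi)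
--             if k == 0:
--                 break
--             if i <= x < i + k:
--                 out.append(j + (x - i) + 1)
--                 break
--             if x < i:
--                 if alo < i and blo < j:
--                     ahi, bhi = i, j
--                 else:
--                     break
--             else:
--                 if i + k < ahi and j + k < bhi:
--                     alo, blo = i + k, j + k
--                 else:
--                     break
--     return out
-- ===== Notes on version B (the rewrite author's own statement) =====
-- stated objective: alternative
-- what changed: B answers each query by a divide-and-conquer descent that walks down the implicit find_longest_match region tree (memoized), instead of A's staged pipeline that materializes get_opcodes and expands every equal run into a dense per-index dict before any lookup.
import Mathlib
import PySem

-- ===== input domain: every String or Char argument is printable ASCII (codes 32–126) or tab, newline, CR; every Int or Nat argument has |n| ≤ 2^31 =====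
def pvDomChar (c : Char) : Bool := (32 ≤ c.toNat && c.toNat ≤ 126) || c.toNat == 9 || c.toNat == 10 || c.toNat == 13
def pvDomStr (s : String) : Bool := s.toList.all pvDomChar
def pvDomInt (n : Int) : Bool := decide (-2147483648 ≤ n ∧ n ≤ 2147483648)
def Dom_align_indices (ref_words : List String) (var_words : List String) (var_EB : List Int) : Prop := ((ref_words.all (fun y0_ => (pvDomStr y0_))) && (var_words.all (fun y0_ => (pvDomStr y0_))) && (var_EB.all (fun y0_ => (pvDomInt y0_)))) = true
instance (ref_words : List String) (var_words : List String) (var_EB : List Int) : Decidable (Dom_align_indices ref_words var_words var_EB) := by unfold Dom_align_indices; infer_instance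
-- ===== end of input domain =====

-- B answers each query by a divide-and-conquer descent through find_longest_match
-- regions instead of A's get_opcodes pass that expands every matched index into a
-- per-index dict (objective: alternative).

-- ===== SHARED LIBRARY CORE: difflib.SequenceMatcher(None, a, b, autojunk=False) =====
-- A calls it via SequenceMatcher; Source B inlines the same junk-free find_longest_match.
-- It is transliterated once from CPython's difflib (isjunk=None and autojunk=False,
-- so the junk/popular sets are empty).

-- b2j = {}; for i, elt in enumerate(b): b2j.setdefault(elt, []).append(i)
def pvB2J (b : List String) : PySem.Dict String (List Nat) :=
  (b.zipIdx.foldl (fun d p => d.modify p.1 [] (· ++ [p.2])) PySem.Dict.empty)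

-- inner loop of find_longest_match: 'for j in b2j.get(a[i], nothing): …' with continue/break
-- state: (newj2len, (besti, bestj, bestsize))
def pvFlmInner (blo bhi i : Nat) (j2len : PySem.Dict Int Nat) :
    List Nat → PySem.Dict Int Nat → Nat × Nat × Nat → PySem.Dict Int Nat × (Nat × Nat × Nat)
  | [], newj2len, best => (newj2len, best)
  | j :: js, newj2len, best =>
    if j < blo then pvFlmInner blo bhi i j2len js newj2len best          -- continue
    else if bhi ≤ j then (newj2len, best)                                 -- break
    else
      let k := j2len.getD ((j : Int) - 1) 0 + 1
      let newj2len := newj2len.insert (j : Int) k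
      -- i-k+1 and j-k+1 written as i+1-k, j+1-k (k ≤ i+1 and k ≤ j+1 along any real run)
      let best := if best.2.2 < k then (i + 1 - k, j + 1 - k, k) else best
      pvFlmInner blo bhi i j2len js newj2len best

-- 'for i in range(alo, ahi): …; j2len = newj2len'
def pvFlmMain (b2j : PySem.Dict String (List Nat)) (a : List String) (blo bhi : Nat) :
    List Nat → PySem.Dict Int Nat → Nat × Nat × Nat → Nat × Nat × Nat
  | [], _, best => best
  | i :: is, j2len, best =>
    let st := pvFlmInner blo bhi i j2len (b2j.getD (a.getD i "") []) PySem.Dict.empty best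
    pvFlmMain b2j a blo bhi is st.1 st.2

-- 'while besti > alo and bestj > blo and a[besti-1] == b[bestj-1]: …' (junk set empty)
def pvExtL (a b : List String) (alo blo : Nat) (besti bestj bestsize : Nat) : Nat × Nat × Nat :=
  if h : alo < besti ∧ blo < bestj ∧ a.getD (besti - 1) "" = b.getD (bestj - 1) "" then
    pvExtL a b alo blo (besti - 1) (bestj - 1) (bestsize + 1)
  else (besti, bestj, bestsize)
termination_by besti
decreasing_by omega

-- 'while besti+bestsize < ahi and bestj+bestsize < bhi and a[…] == b[…]: bestsize += 1'
def pvExtR (a b : List String) (ahi bhi : Nat) (besti bestj bestsize : Nat) : Nat × Nat × Nat :=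
  if h : besti + bestsize < ahi ∧ bestj + bestsize < bhi ∧
         a.getD (besti + bestsize) "" = b.getD (bestj + bestsize) "" then
    pvExtR a b ahi bhi besti bestj (bestsize + 1)
  else (besti, bestj, bestsize)
termination_by ahi - (besti + bestsize)
decreasing_by omega

-- find_longest_match(alo, ahi, blo, bhi); the two junk-extension loops of CPython never
-- execute here because the junk set is empty (isjunk=None), so they are not repeated
def pvFLM (b2j : PySem.Dict String (List Nat)) (a b : List String)
    (alo ahi blo bhi : Nat) : Nat × Nat × Nat :=
  let best := pvFlmMain b2j a blo bhi (List.range' alo (ahi - alo)) PySem.Dict.empty (alo, blo, 0)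
  let best := pvExtL a b alo blo best.1 best.2.1 best.2.2
  pvExtR a b ahi bhi best.1 best.2.1 best.2.2

-- bounds of the block find_longest_match returns: it lies inside the queried window.
-- (Needed by the recursion of B's port for termination, so it is stated here.)
def pvBestOK (alo ahi blo bhi : Nat) (t : Nat × Nat × Nat) : Prop :=
  alo ≤ t.1 ∧ blo ≤ t.2.1 ∧ t.1 + t.2.2 ≤ ahi ∧ t.2.1 + t.2.2 ≤ bhi

def pvJOK (blo bound : Nat) (d : PySem.Dict Int Nat) : Prop :=
  ∀ key : Int, d.getD key 0 ≠ 0 → ((d.getD key 0 : Int) ≤ key + 1 - (blo : Int) ∧ d.getD key 0 ≤ bound)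

lemma pvFlmInner_ok (alo ahi blo bhi i : Nat) (hi1 : alo ≤ i) (hi2 : i < ahi)
    (j2len : PySem.Dict Int Nat) (hJ : pvJOK blo (i - alo) j2len) :
    ∀ (js : List Nat) (nd : PySem.Dict Int Nat) (best : Nat × Nat × Nat),
      pvJOK blo (i + 1 - alo) nd → pvBestOK alo ahi blo bhi best →
      pvJOK blo (i + 1 - alo) (pvFlmInner blo bhi i j2len js nd best).1 ∧
      pvBestOK alo ahi blo bhi (pvFlmInner blo bhi i j2len js nd best).2 := by
  intro js
  induction js with
  | nil => intro nd best h1 h2; exact ⟨h1, h2⟩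
  | cons j js ih =>
    intro nd best h1 h2
    by_cases hb1 : j < blo
    · simpa [pvFlmInner, hb1] using ih nd best h1 h2
    · by_cases hb2 : bhi ≤ j
      · simpa [pvFlmInner, hb1, hb2] using ⟨h1, h2⟩
      · simp only [pvFlmInner, if_neg hb1, if_neg hb2]
        -- k bounds from hJ
        have hkj : j2len.getD ((j : Int) - 1) 0 + blo ≤ j := by
          by_cases h0 : j2len.getD ((j : Int) - 1) 0 = 0
          · omega
          · have := (hJ _ h0).1
            push_cast at this
            omega
        have hki : j2len.getD ((j : Int) - 1) 0 + 1 ≤ i + 1 - alo := by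
          by_cases h0 : j2len.getD ((j : Int) - 1) 0 = 0
          · omega
          · have := (hJ _ h0).2
            omega
        apply ih
        · -- dict invariant after insert
          unfold pvJOK
          intro key
          rw [PySem.Dict.getD_insert]
          split_ifs with hkey
          · intro _
            subst hkey
            constructor
            · push_cast
              omega
            · exact hki
          · exact h1 key
        · -- best invariant after possible update
          split_ifs with hupd
          · exact ⟨by simp; omega, by simp; omega, by simp; omega, by simp; omega⟩
          · exact h2

lemma pvFlmMain_ok (b2j : PySem.Dict String (List Nat)) (a : List String)
    (alo ahi blo bhi : Nat) :
    ∀ (n i0 : Nat) (j2len : PySem.Dict Int Nat) (best : Nat × Nat × Nat),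
      alo ≤ i0 → i0 + n ≤ ahi → pvJOK blo (i0 - alo) j2len → pvBestOK alo ahi blo bhi best →
      pvBestOK alo ahi blo bhi (pvFlmMain b2j a blo bhi (List.range' i0 n) j2len best) := by
  intro n
  induction n with
  | zero => intro i0 j2len best _ _ _ hB; simpa [pvFlmMain] using hB
  | succ n ih =>
    intro i0 j2len best h1 h2 hJ hB
    have hi2 : i0 < ahi := by omega
    have hstep := pvFlmInner_ok alo ahi blo bhi i0 h1 hi2 j2len hJ
      (b2j.getD (a.getD i0 "") []) PySem.Dict.empty best
      (by intro key h; simp [PySem.Dict.getD_empty] at h) hB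
    have : List.range' i0 (n + 1) = i0 :: List.range' (i0 + 1) n := rfl
    rw [this]
    simp only [pvFlmMain]
    exact ih (i0 + 1) _ _ (by omega) (by omega)
      (by
        have := hstep.1
        intro key h
        have h' := this key h
        exact ⟨h'.1, by omega⟩)
      hstep.2

lemma pvExtL_ok (a b : List String) (alo ahi blo bhi : Nat) :
    ∀ besti bestj bestsize, alo ≤ besti → blo ≤ bestj →
      besti + bestsize ≤ ahi → bestj + bestsize ≤ bhi →
      pvBestOK alo ahi blo bhi (pvExtL a b alo blo besti bestj bestsize) := by
  intro besti
  induction besti using Nat.strong_induction_on with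
  | _ besti ih =>
    intro bestj bestsize h1 h2 h3 h4
    rw [pvExtL]
    split_ifs with h
    · exact ih (besti - 1) (by omega) _ _ (by omega) (by omega) (by omega) (by omega)
    · exact ⟨h1, h2, h3, h4⟩

lemma pvExtR_ok (a b : List String) (alo ahi blo bhi : Nat) :
    ∀ fuel besti bestj bestsize, ahi - (besti + bestsize) ≤ fuel →
      alo ≤ besti → blo ≤ bestj → besti + bestsize ≤ ahi → bestj + bestsize ≤ bhi →
      pvBestOK alo ahi blo bhi (pvExtR a b ahi bhi besti bestj bestsize) := by
  intro fuel
  induction fuel with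
  | zero =>
    intro besti bestj bestsize hf h1 h2 h3 h4
    rw [pvExtR]
    split_ifs with h
    · omega
    · exact ⟨h1, h2, h3, h4⟩
  | succ fuel ih =>
    intro besti bestj bestsize hf h1 h2 h3 h4
    rw [pvExtR]
    split_ifs with h
    · exact ih _ _ _ (by omega) (by omega) (by omega) (by omega) (by omega)
    · exact ⟨h1, h2, h3, h4⟩

lemma pvFLM_bounds (b2j : PySem.Dict String (List Nat)) (a b : List String)
    (alo ahi blo bhi : Nat) (h1 : alo ≤ ahi) (h2 : blo ≤ bhi) :
    pvBestOK alo ahi blo bhi (pvFLM b2j a b alo ahi blo bhi) := by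
  have hm : pvBestOK alo ahi blo bhi
      (pvFlmMain b2j a blo bhi (List.range' alo (ahi - alo)) PySem.Dict.empty (alo, blo, 0)) :=
    pvFlmMain_ok b2j a alo ahi blo bhi (ahi - alo) alo PySem.Dict.empty (alo, blo, 0)
      (le_refl _) (by omega)
      (by intro key h; simp [PySem.Dict.getD_empty] at h)
      ⟨le_refl _, le_refl _, by omega, by omega⟩
  have hl := pvExtL_ok a b alo ahi blo bhi _ _ _ hm.1 hm.2.1 hm.2.2.1 hm.2.2.2
  have hr := pvExtR_ok a b alo ahi blo bhi ahi _ _ _ (by omega)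
    hl.1 hl.2.1 hl.2.2.1 hl.2.2.2
  exact hr

-- ===== PORT A =====
def pvRegionSize : Nat × Nat × Nat × Nat → Nat
  | (alo, ahi, _, _) => 2 * (ahi - alo) + 1

def pvQMeasure (q : List (Nat × Nat × Nat × Nat)) : Nat := (q.map pvRegionSize).sum

-- 'while queue: … queue.pop() …'; the stack's top is the list head; Python pushes the
-- left piece first, then the right piece, so the right piece ends up on top
def pvQueueLoop (b2j : PySem.Dict String (List Nat)) (a b : List String) :
    List (Nat × Nat × Nat × Nat) → List (Nat × Nat × Nat) → List (Nat × Nat × Nat)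
  | [], acc => acc
  | (alo, ahi, blo, bhi) :: rest, acc =>
    let x := pvFLM b2j a b alo ahi blo bhi
    let i := x.1; let j := x.2.1; let k := x.2.2
    if k ≠ 0 then
      let acc := acc ++ [(i, j, k)]
      let q1 : List (Nat × Nat × Nat × Nat) := if alo < i ∧ blo < j then [(alo, i, blo, j)] else []
      let q2 : List (Nat × Nat × Nat × Nat) :=
        if i + k < ahi ∧ j + k < bhi then [(i + k, ahi, j + k, bhi)] else []
      -- totality guard: always true on real runs, because the block found by
      -- find_longest_match lies inside the popped region, so the split regions are
      -- strictly smaller; it only makes the recursion well-founded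
      if hm : pvQMeasure (q2 ++ q1 ++ rest) < pvQMeasure ((alo, ahi, blo, bhi) :: rest) then
        pvQueueLoop b2j a b (q2 ++ q1 ++ rest) acc
      else acc
    else pvQueueLoop b2j a b rest acc
termination_by q _ => pvQMeasure q
decreasing_by
  · exact hm
  · simp [pvQMeasure, pvRegionSize]

-- get_matching_blocks() without its final sentinel: the sorted-and-merged block list
def pvNonAdjacent (a b : List String) : List (Nat × Nat × Nat) :=
  let b2j := pvB2J b
  let raw := pvQueueLoop b2j a b [(0, a.length, 0, b.length)] []
  let srt := PySem.List.sorted raw (fun t => [t.1, t.2.1, t.2.2]) false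
  let st := srt.foldl
    (fun (st : Nat × Nat × Nat × List (Nat × Nat × Nat)) blk =>
      let i1 := st.1; let j1 := st.2.1; let k1 := st.2.2.1; let acc := st.2.2.2
      let i2 := blk.1; let j2 := blk.2.1; let k2 := blk.2.2
      if i1 + k1 = i2 ∧ j1 + k1 = j2 then (i1, j1, k1 + k2, acc)
      else if k1 ≠ 0 then (i2, j2, k2, acc ++ [(i1, j1, k1)])
      else (i2, j2, k2, acc))
    (0, 0, 0, [])
  if st.2.2.1 ≠ 0 then st.2.2.2 ++ [(st.1, st.2.1, st.2.2.1)] else st.2.2.2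

-- get_matching_blocks(): merged blocks plus the (la, lb, 0) sentinel
def pvMatchingBlocks (a b : List String) : List (Nat × Nat × Nat) :=
  pvNonAdjacent a b ++ [(a.length, b.length, 0)]

-- get_opcodes(): fold over the matching blocks with state (i, j, answer)
def pvGetOpcodes (blocks : List (Nat × Nat × Nat)) : List (String × Nat × Nat × Nat × Nat) :=
  (blocks.foldl
    (fun (st : Nat × Nat × List (String × Nat × Nat × Nat × Nat)) blk =>
      let i := st.1; let j := st.2.1; let answer := st.2.2
      let ai := blk.1; let bj := blk.2.1; let size := blk.2.2
      let tag : String :=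
        if i < ai ∧ j < bj then "replace"
        else if i < ai then "delete"
        else if j < bj then "insert"
        else ""
      let answer := if tag ≠ "" then answer ++ [(tag, i, ai, j, bj)] else answer
      let answer := if size ≠ 0 then answer ++ [("equal", ai, ai + size, bj, bj + size)] else answer
      (ai + size, bj + size, answer))
    (0, 0, [])).2.2

def build_word_index_mapping (var_words ref_words : List String) : PySem.Dict Int Int :=
  (pvGetOpcodes (pvMatchingBlocks var_words ref_words)).foldl
    (fun m op =>
      if op.1 = "equal" then
        (List.range (op.2.2.1 - op.2.1)).foldl
          (fun m k => m.insert ((op.2.1 + k : Nat) : Int) ((op.2.2.2.1 + k : Nat) : Int)) m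
      else m)
    PySem.Dict.empty

def align_indices (ref_words : List String) (var_words : List String) (var_EB : List Int) : List Int :=
  let mapping := build_word_index_mapping var_words ref_words
  var_EB.foldl
    (fun aligned w =>
      let var_i := w - 1
      match mapping.get? var_i with
      | some ref_i => aligned ++ [ref_i + 1]
      | none => aligned)
    []

-- ===== PORT B =====
-- the per-query 'while True' descent of Source B, as tail recursion over the region
-- (Source B memoizes its find_longest_match in a dict; the memo is a transparent cache of
-- this pure function, so the port calls pvFLM directly).
-- The 'hv' guard only makes the recursion well-founded: the initial region is
-- (0, len a, 0, len b) and by pvFLM_bounds every descended region stays valid.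
def pvDescend (b2j : PySem.Dict String (List Nat)) (a b : List String) (x : Int) :
    Nat → Nat → Nat → Nat → Option Int
  | alo, ahi, blo, bhi =>
    if hv : alo ≤ ahi ∧ blo ≤ bhi then
      match hr : pvFLM b2j a b alo ahi blo bhi with
      | (i, j, k) =>
        if hk : k = 0 then none
        else if (i : Int) ≤ x ∧ x < (i : Int) + (k : Int) then
          some ((j : Int) + (x - (i : Int)))
        else if x < (i : Int) then
          if h2 : alo < i ∧ blo < j then pvDescend b2j a b x alo i blo j else none
        else
          if h3 : i + k < ahi ∧ j + k < bhi then pvDescend b2j a b x (i + k) ahi (j + k) bhi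
          else none
    else none
termination_by alo ahi _ _ => ahi - alo
decreasing_by
  · have hb := pvFLM_bounds b2j a b alo ahi blo bhi hv.1 hv.2
    rw [hr] at hb
    simp only [pvBestOK] at hb
    omega
  · have hb := pvFLM_bounds b2j a b alo ahi blo bhi hv.1 hv.2
    rw [hr] at hb
    simp only [pvBestOK] at hb
    omega

def align_indices_alt (ref_words : List String) (var_words : List String) (var_EB : List Int) : List Int :=
  let b2j := pvB2J ref_words
  var_EB.foldl
    (fun out w =>
      match pvDescend b2j var_words ref_words (w - 1) 0 var_words.length 0 ref_words.length with
      | some r => out ++ [r + 1]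
      | none => out)
    []

-- ===== PRECONDITION & SPEC =====
def Spec_align_indices (ref_words : List String) (var_words : List String) (var_EB : List Int) (out : List Int) : Prop := out = align_indices_alt ref_words var_words var_EB
instance (ref_words : List String) (var_words : List String) (var_EB : List Int) (out : List Int) : Decidable (Spec_align_indices ref_words var_words var_EB out) := by unfold Spec_align_indices; infer_instance

-- ===== CLAIM (what is proved, stated in full; the proofs are below) =====
def Claim_equal_align_indices : Prop := ∀ (ref_words : List String) (var_words : List String) (var_EB : List Int), Dom_align_indices ref_words var_words var_EB → Spec_align_indices ref_words var_words var_EB (align_indices ref_words var_words var_EB)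

-- ===== LEMMAS AND PROOFS =====

lemma pvFLM_bounds' (b2j : PySem.Dict String (List Nat)) (a b : List String)
    {alo ahi blo bhi i j k : Nat} (h1 : alo ≤ ahi) (h2 : blo ≤ bhi)
    (hflm : pvFLM b2j a b alo ahi blo bhi = (i, j, k)) :
    alo ≤ i ∧ blo ≤ j ∧ i + k ≤ ahi ∧ j + k ≤ bhi := by
  have h := pvFLM_bounds b2j a b alo ahi blo bhi h1 h2
  rw [hflm] at h
  exact h


-- the blocks the queue loop would find, organised as the recursion tree B descends
def spcB (b2j : PySem.Dict String (List Nat)) (a b : List String) :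
    Nat → Nat → Nat → Nat → List (Nat × Nat × Nat)
  | alo, ahi, blo, bhi =>
    if hv : alo ≤ ahi ∧ blo ≤ bhi then
      match hr : pvFLM b2j a b alo ahi blo bhi with
      | (i, j, k) =>
        if hk : k = 0 then []
        else
          (i, j, k) ::
            ((if h2 : alo < i ∧ blo < j then spcB b2j a b alo i blo j else []) ++
             (if h3 : i + k < ahi ∧ j + k < bhi then spcB b2j a b (i + k) ahi (j + k) bhi
              else []))
    else []
termination_by alo ahi _ _ => ahi - alo
decreasing_by
  · have hb := pvFLM_bounds b2j a b alo ahi blo bhi hv.1 hv.2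
    rw [hr] at hb
    simp only [pvBestOK] at hb
    omega
  · have hb := pvFLM_bounds b2j a b alo ahi blo bhi hv.1 hv.2
    rw [hr] at hb
    simp only [pvBestOK] at hb
    omega

-- 'block blk sends the 0-based index x to v'
def pvMaps (L : List (Nat × Nat × Nat)) (x v : Int) : Prop :=
  ∃ blk ∈ L, (blk.1 : Int) ≤ x ∧ x < (blk.1 : Int) + (blk.2.2 : Int) ∧
    v = (blk.2.1 : Int) + (x - (blk.1 : Int))

-- first-match scan of a block list (the shape A's dict lookup reduces to)
def pvLocate (x : Int) : List (Nat × Nat × Nat) → Option Int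
  | [] => none
  | (i, j, n) :: rest =>
    if (i : Int) ≤ x ∧ x < (i : Int) + (n : Int) then some ((j : Int) + (x - (i : Int)))
    else pvLocate x rest

-- the (key, value) pairs one block contributes to A's mapping
def pvSegPairs (blk : Nat × Nat × Nat) : List (Int × Int) :=
  (List.range blk.2.2).map (fun k => (((blk.1 + k : Nat) : Int), ((blk.2.1 + k : Nat) : Int)))

def pvPairs (blocks : List (Nat × Nat × Nat)) : List (Int × Int) :=
  blocks.flatMap pvSegPairs

-- the opcodes one get_opcodes step appends, and the whole opcode list, recursively
def pvOpsDelta (i j : Nat) (blk : Nat × Nat × Nat) : List (String × Nat × Nat × Nat × Nat) :=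
  let ai := blk.1; let bj := blk.2.1; let size := blk.2.2
  let tag : String :=
    if i < ai ∧ j < bj then "replace"
    else if i < ai then "delete"
    else if j < bj then "insert"
    else ""
  (if tag ≠ "" then [(tag, i, ai, j, bj)] else []) ++
  (if size ≠ 0 then [("equal", ai, ai + size, bj, bj + size)] else [])

def pvOpsAll : Nat → Nat → List (Nat × Nat × Nat) → List (String × Nat × Nat × Nat × Nat)
  | _, _, [] => []
  | i, j, blk :: bs => pvOpsDelta i j blk ++ pvOpsAll (blk.1 + blk.2.2) (blk.2.1 + blk.2.2) bs

lemma pvFoldOps (blocks : List (Nat × Nat × Nat)) :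
    ∀ (i j : Nat) (answer : List (String × Nat × Nat × Nat × Nat)),
    (blocks.foldl
      (fun (st : Nat × Nat × List (String × Nat × Nat × Nat × Nat)) blk =>
        let i := st.1; let j := st.2.1; let answer := st.2.2
        let ai := blk.1; let bj := blk.2.1; let size := blk.2.2
        let tag : String :=
          if i < ai ∧ j < bj then "replace"
          else if i < ai then "delete"
          else if j < bj then "insert"
          else ""
        let answer := if tag ≠ "" then answer ++ [(tag, i, ai, j, bj)] else answer
        let answer := if size ≠ 0 then answer ++ [("equal", ai, ai + size, bj, bj + size)] else answer
        (ai + size, bj + size, answer))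
      (i, j, answer)).2.2 = answer ++ pvOpsAll i j blocks := by
  induction blocks with
  | nil => intro i j answer; simp [pvOpsAll]
  | cons blk bs ih =>
    intro i j answer
    simp only [List.foldl_cons]
    rw [ih]
    simp only [pvOpsAll, pvOpsDelta]
    by_cases h1 : (if i < blk.1 ∧ j < blk.2.1 then "replace"
          else if i < blk.1 then "delete"
          else if j < blk.2.1 then "insert"
          else "") ≠ "" <;>
      by_cases h2 : blk.2.2 ≠ 0 <;>
      simp [h1, h2, List.append_assoc]

lemma pvGetOpcodes_eq_opsAll (blocks : List (Nat × Nat × Nat)) :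
    pvGetOpcodes blocks = pvOpsAll 0 0 blocks := by
  unfold pvGetOpcodes
  rw [pvFoldOps blocks 0 0 []]
  simp

-- A's mapping fold over the opcodes is a fold of plain inserts over the blocks' pairs
lemma pvMapFold_eq_insertFold (blocks : List (Nat × Nat × Nat)) :
    ∀ (i j : Nat) (m : PySem.Dict Int Int),
    (pvOpsAll i j blocks).foldl
      (fun m op =>
        if op.1 = "equal" then
          (List.range (op.2.2.1 - op.2.1)).foldl
            (fun m k => m.insert ((op.2.1 + k : Nat) : Int) ((op.2.2.2.1 + k : Nat) : Int)) m
        else m) m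
    = (pvPairs blocks).foldl (fun d p => d.insert p.1 p.2) m := by
  induction blocks with
  | nil => intro i j m; simp [pvOpsAll, pvPairs]
  | cons blk bs ih =>
    intro i j m
    simp only [pvOpsAll, pvPairs, List.flatMap_cons, List.foldl_append]
    rw [ih]
    congr 1
    simp only [pvOpsDelta]
    by_cases h1 : (if i < blk.1 ∧ j < blk.2.1 then "replace"
          else if i < blk.1 then "delete"
          else if j < blk.2.1 then "insert"
          else "") ≠ ""
    case pos =>
      rw [if_pos h1]
      simp only [List.cons_append, List.nil_append, List.foldl_cons]
      have htag : (if i < blk.1 ∧ j < blk.2.1 then "replace"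
          else if i < blk.1 then "delete"
          else if j < blk.2.1 then "insert"
          else "") ≠ "equal" := by
        split_ifs <;> decide
      rw [if_neg htag]
      by_cases h2 : blk.2.2 ≠ 0
      · rw [if_pos h2]
        simp [pvSegPairs, List.foldl_map]
      · rw [if_neg h2]
        simp only [ne_eq, not_not] at h2
        simp [pvSegPairs, h2]
    case neg =>
      rw [if_neg h1]
      simp only [List.nil_append]
      by_cases h2 : blk.2.2 ≠ 0
      · rw [if_pos h2]
        simp [pvSegPairs, List.foldl_map]
      · rw [if_neg h2]
        simp only [ne_eq, not_not] at h2
        simp [pvSegPairs, h2]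

-- last-write-wins: a fold of inserts is looked up by a first-match scan of the
-- reversed pair list
lemma pvGet?_foldl_insert (ps : List (Int × Int)) (m : PySem.Dict Int Int) (x : Int) :
    ((ps.foldl (fun d p => d.insert p.1 p.2) m).get? x)
      = ((ps.reverse.find? (fun p => p.1 == x)).map Prod.snd).or (m.get? x) := by
  induction ps generalizing m with
  | nil => simp
  | cons p t ih =>
    simp only [List.foldl_cons, ih, List.reverse_cons, List.find?_append]
    cases hf : t.reverse.find? (fun p => p.1 == x) with
    | some v => simp
    | none =>
      simp only [Option.none_or, List.find?_cons, List.find?_nil]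
      by_cases hx : x = p.1
      · simp [hx, PySem.Dict.get?_insert_self]
      · rw [PySem.Dict.get?_insert_of_ne _ _ hx]
        have : (p.1 == x) = false := by simp [Ne.symm hx]
        simp [this]

-- one block's reversed pair segment, searched for key x
lemma pvFind_segPairs_reverse (blk : Nat × Nat × Nat) (x : Int) :
    ((pvSegPairs blk).reverse.find? (fun p => p.1 == x))
      = if (blk.1 : Int) ≤ x ∧ x < (blk.1 : Int) + (blk.2.2 : Int)
        then some (x, (blk.2.1 : Int) + (x - (blk.1 : Int))) else none := by
  obtain ⟨ai, bj, size⟩ := blk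
  simp only [pvSegPairs]
  induction size with
  | zero => simp
  | succ n ih =>
    rw [List.range_succ]
    simp only [List.map_append, List.reverse_append, List.map_cons, List.map_nil,
      List.reverse_cons, List.reverse_nil, List.nil_append, List.cons_append]
    by_cases hx : x = ((ai + n : Nat) : Int)
    · rw [List.find?_cons_of_pos (by simp [hx])]
      have hc : (ai : Int) ≤ x ∧ x < (ai : Int) + ((n+1 : Nat) : Int) := by
        push_cast at hx ⊢; omega
      rw [if_pos hc]
      simp only [Option.some.injEq, Prod.mk.injEq]
      push_cast at hx ⊢
      exact ⟨by omega, by omega⟩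
    · rw [List.find?_cons_of_neg (by simp; push_cast at hx ⊢; omega)]
      rw [ih]
      by_cases hc : (ai : Int) ≤ x ∧ x < (ai : Int) + (n : Int)
      · rw [if_pos hc, if_pos (by push_cast at hc ⊢; omega)]
      · rw [if_neg hc, if_neg (by push_cast at hc hx ⊢; omega)]

-- the first-match scan over a block list is the first-match over its reversed pairs
lemma pvLocate_eq_find (bl : List (Nat × Nat × Nat)) (x : Int) :
    ((bl.flatMap (fun blk => (pvSegPairs blk).reverse)).find? (fun p => p.1 == x)).map Prod.snd
      = pvLocate x bl := by
  induction bl with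
  | nil => simp [pvLocate]
  | cons blk t ih =>
    obtain ⟨i, j, n⟩ := blk
    simp only [List.flatMap_cons, List.find?_append, pvLocate]
    rw [pvFind_segPairs_reverse (i, j, n) x]
    by_cases hc : (i : Int) ≤ x ∧ x < (i : Int) + (n : Int)
    · simp [hc]
    · simp only [hc, if_false, Option.none_or, ih]

-- A's dict lookup is a first-match scan of the reversed merged block list
lemma pvMapping_eq_locate (vw rw : List String) (x : Int) :
    (build_word_index_mapping vw rw).get? x
      = pvLocate x (pvNonAdjacent vw rw).reverse := by
  unfold build_word_index_mapping pvMatchingBlocks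
  rw [pvGetOpcodes_eq_opsAll, pvMapFold_eq_insertFold, pvGet?_foldl_insert]
  have hpairs : pvPairs (pvNonAdjacent vw rw ++ [(vw.length, rw.length, 0)])
      = pvPairs (pvNonAdjacent vw rw) := by
    simp [pvPairs, pvSegPairs]
  rw [hpairs]
  have hrev : (pvPairs (pvNonAdjacent vw rw)).reverse
      = (pvNonAdjacent vw rw).reverse.flatMap (fun blk => (pvSegPairs blk).reverse) := by
    simp only [pvPairs, List.reverse_flatMap]
    rfl
  rw [hrev, ← pvLocate_eq_find]
  simp [PySem.Dict.get?_empty]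

-- unfolding helpers for the recursion tree
lemma spcB_cons (b2j : PySem.Dict String (List Nat)) (a b : List String)
    {alo ahi blo bhi i j k : Nat}
    (hv : alo ≤ ahi ∧ blo ≤ bhi) (hflm : pvFLM b2j a b alo ahi blo bhi = (i, j, k))
    (hk : k ≠ 0) :
    spcB b2j a b alo ahi blo bhi = (i, j, k) ::
      ((if alo < i ∧ blo < j then spcB b2j a b alo i blo j else []) ++
       (if i + k < ahi ∧ j + k < bhi then spcB b2j a b (i + k) ahi (j + k) bhi else [])) := by
  rw [spcB, dif_pos hv, hflm]
  simp [hk]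

lemma spcB_nil_k0 (b2j : PySem.Dict String (List Nat)) (a b : List String)
    {alo ahi blo bhi i j : Nat}
    (hv : alo ≤ ahi ∧ blo ≤ bhi) (hflm : pvFLM b2j a b alo ahi blo bhi = (i, j, 0)) :
    spcB b2j a b alo ahi blo bhi = [] := by
  rw [spcB, dif_pos hv, hflm]
  simp

lemma spcB_nil_inv (b2j : PySem.Dict String (List Nat)) (a b : List String)
    {alo ahi blo bhi : Nat} (h : ¬(alo ≤ ahi ∧ blo ≤ bhi)) :
    spcB b2j a b alo ahi blo bhi = [] := by
  rw [spcB, dif_neg h]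

-- membership in a block's pair segment is exactly 'the block maps x'
lemma pvMem_segPairs (blk : Nat × Nat × Nat) (x v : Int) :
    (x, v) ∈ pvSegPairs blk ↔
      (blk.1 : Int) ≤ x ∧ x < (blk.1 : Int) + (blk.2.2 : Int) ∧
        v = (blk.2.1 : Int) + (x - (blk.1 : Int)) := by
  simp only [pvSegPairs, List.mem_map, List.mem_range, Prod.mk.injEq]
  constructor
  · rintro ⟨kk, hkk, hx, hv⟩
    push_cast [← hx, ← hv]
    omega
  · rintro ⟨h1, h2, h3⟩
    refine ⟨(x - (blk.1 : Int)).toNat, by omega, by push_cast; omega, by push_cast; omega⟩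

lemma pvMaps_iff_mem_pairs (L : List (Nat × Nat × Nat)) (x v : Int) :
    pvMaps L x v ↔ (x, v) ∈ pvPairs L := by
  simp [pvMaps, pvPairs, List.mem_flatMap, pvMem_segPairs]

-- a successful first-match scan exhibits a mapping block, and a mapping block
-- guarantees the scan succeeds
lemma pvLocate_some_maps {L : List (Nat × Nat × Nat)} {x v : Int}
    (h : pvLocate x L = some v) : pvMaps L x v := by
  induction L with
  | nil => simp [pvLocate] at h
  | cons blk t ih =>
    obtain ⟨i, j, n⟩ := blk
    rw [pvLocate] at h
    split_ifs at h with hc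
    · exact ⟨(i, j, n), List.mem_cons_self, hc.1, hc.2, by simpa using h.symm⟩
    · obtain ⟨b', hb', h1, h2, h3⟩ := ih h
      exact ⟨b', List.mem_cons_of_mem _ hb', h1, h2, h3⟩

lemma pvLocate_isSome_of_maps {L : List (Nat × Nat × Nat)} {x v : Int}
    (h : pvMaps L x v) : ∃ v', pvLocate x L = some v' := by
  induction L with
  | nil => simp [pvMaps] at h
  | cons blk t ih =>
    obtain ⟨i, j, n⟩ := blk
    rw [pvLocate]
    split_ifs with hc
    · exact ⟨_, rfl⟩
    · obtain ⟨b', hb', h1, h2, h3⟩ := h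
      rcases List.mem_cons.mp hb' with rfl | hmem
      · exact absurd ⟨h1, h2⟩ hc
      · exact ih ⟨b', hmem, h1, h2, h3⟩

lemma pvPairs_append (l1 l2 : List (Nat × Nat × Nat)) :
    pvPairs (l1 ++ l2) = pvPairs l1 ++ pvPairs l2 := by
  simp [pvPairs]

-- a merged run contributes the same pairs as its two adjacent halves
lemma pvSegPairs_split (i j k1 k2 : Nat) :
    pvSegPairs (i, j, k1 + k2)
      = pvSegPairs (i, j, k1) ++ pvSegPairs (i + k1, j + k1, k2) := by
  simp only [pvSegPairs, List.range_add, List.map_append, List.map_map]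
  congr 1
  apply List.map_congr_left
  intro t _
  simp only [Function.comp_apply, Prod.mk.injEq]
  constructor <;> · push_cast; ring

lemma pvMergeFold_pairs :
    ∀ (L : List (Nat × Nat × Nat)) (i1 j1 k1 : Nat) (acc : List (Nat × Nat × Nat)),
    (let st := L.foldl
      (fun (st : Nat × Nat × Nat × List (Nat × Nat × Nat)) blk =>
        let i1 := st.1; let j1 := st.2.1; let k1 := st.2.2.1; let acc := st.2.2.2
        let i2 := blk.1; let j2 := blk.2.1; let k2 := blk.2.2
        if i1 + k1 = i2 ∧ j1 + k1 = j2 then (i1, j1, k1 + k2, acc)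
        else if k1 ≠ 0 then (i2, j2, k2, acc ++ [(i1, j1, k1)])
        else (i2, j2, k2, acc))
      (i1, j1, k1, acc);
     pvPairs (if st.2.2.1 ≠ 0 then st.2.2.2 ++ [(st.1, st.2.1, st.2.2.1)] else st.2.2.2))
    = pvPairs acc ++ pvSegPairs (i1, j1, k1) ++ pvPairs L := by
  intro L
  induction L with
  | nil =>
    intro i1 j1 k1 acc
    by_cases h : k1 ≠ 0
    · simp [h, pvPairs, pvSegPairs]
    · simp only [ne_eq, not_not] at h
      subst h
      simp [pvPairs, pvSegPairs]
  | cons blk L ih =>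
    intro i1 j1 k1 acc
    simp only [List.foldl_cons]
    by_cases hc : i1 + k1 = blk.1 ∧ j1 + k1 = blk.2.1
    · rw [if_pos hc]
      rw [ih]
      have hsplit : pvSegPairs (i1, j1, k1 + blk.2.2)
          = pvSegPairs (i1, j1, k1) ++ pvSegPairs blk := by
        rw [pvSegPairs_split, hc.1, hc.2]
      rw [hsplit]
      simp [pvPairs, List.append_assoc]
    · rw [if_neg hc]
      by_cases h0 : k1 ≠ 0
      · rw [if_pos h0, ih]
        rw [pvPairs_append]
        have : pvPairs [(i1, j1, k1)] = pvSegPairs (i1, j1, k1) := by simp [pvPairs]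
        rw [this]
        simp [pvPairs, List.append_assoc]
      · rw [if_neg h0, ih]
        simp only [ne_eq, not_not] at h0
        subst h0
        simp [pvPairs, pvSegPairs]

-- merging adjacent blocks preserves the pair list exactly
lemma pvPairs_nonAdjacent (a b : List String) :
    pvPairs (pvNonAdjacent a b)
      = pvPairs (PySem.List.sorted
          (pvQueueLoop (pvB2J b) a b [(0, a.length, 0, b.length)] [])
          (fun t => [t.1, t.2.1, t.2.2]) false) := by
  unfold pvNonAdjacent
  have h := pvMergeFold_pairs
    (PySem.List.sorted (pvQueueLoop (pvB2J b) a b [(0, a.length, 0, b.length)] [])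
      (fun t => [t.1, t.2.1, t.2.2]) false) 0 0 0 []
  simpa [pvPairs, pvSegPairs] using h

-- every block of the recursion tree lies inside its region and is nonempty
lemma spcB_mem_bounds (b2j : PySem.Dict String (List Nat)) (a b : List String) :
    ∀ alo ahi blo bhi blk, blk ∈ spcB b2j a b alo ahi blo bhi →
      alo ≤ blk.1 ∧ blk.1 + blk.2.2 ≤ ahi ∧ blo ≤ blk.2.1 ∧ blk.2.1 + blk.2.2 ≤ bhi ∧
        1 ≤ blk.2.2 := by
  intro alo ahi blo bhi
  induction alo, ahi, blo, bhi using spcB.induct b2j a b with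
  | case1 alo ahi blo bhi hv i j hflm =>
    intro blk hmem
    rw [spcB_nil_k0 b2j a b hv hflm] at hmem
    simp at hmem
  | case2 alo ahi blo bhi hv i j k hflm hk ihL ihR =>
    intro blk hmem
    obtain ⟨B1, B2, B3, B4⟩ := pvFLM_bounds' b2j a b hv.1 hv.2 hflm
    rw [spcB_cons b2j a b hv hflm hk] at hmem
    rcases List.mem_cons.mp hmem with rfl | hmem'
    · dsimp only
      omega
    · rcases List.mem_append.mp hmem' with hL | hR
      · split_ifs at hL with h2
        · obtain ⟨c1, c2, c3, c4, c5⟩ := ihL h2 blk hL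
          exact ⟨by omega, by omega, by omega, by omega, c5⟩
        · simp at hL
      · split_ifs at hR with h3
        · obtain ⟨c1, c2, c3, c4, c5⟩ := ihR h3 blk hR
          exact ⟨by omega, by omega, by omega, by omega, c5⟩
        · simp at hR
  | case3 alo ahi blo bhi hv =>
    intro blk hmem
    rw [spcB_nil_inv b2j a b hv] at hmem
    simp at hmem

lemma pvMaps_subset {L L' : List (Nat × Nat × Nat)} {x v : Int} (h : L ⊆ L')
    (hm : pvMaps L x v) : pvMaps L' x v := by
  obtain ⟨bb, hbb, p⟩ := hm
  exact ⟨bb, h hbb, p⟩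

-- where a mapping block of the recursion tree can sit relative to the root block
lemma spcB_cases (b2j : PySem.Dict String (List Nat)) (a b : List String)
    {alo ahi blo bhi i j k : Nat}
    (hv : alo ≤ ahi ∧ blo ≤ bhi) (hflm : pvFLM b2j a b alo ahi blo bhi = (i, j, k))
    (hk : k ≠ 0) {x v : Int} (hm : pvMaps (spcB b2j a b alo ahi blo bhi) x v) :
    ((i : Int) ≤ x ∧ x < (i : Int) + (k : Int) ∧ v = (j : Int) + (x - (i : Int))) ∨
    (x < (i : Int) ∧ (alo < i ∧ blo < j) ∧ pvMaps (spcB b2j a b alo i blo j) x v) ∨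
    ((i : Int) + (k : Int) ≤ x ∧ (i + k < ahi ∧ j + k < bhi) ∧
      pvMaps (spcB b2j a b (i + k) ahi (j + k) bhi) x v) := by
  rw [spcB_cons b2j a b hv hflm hk] at hm
  obtain ⟨bb, hbb, p, q, e⟩ := hm
  rcases List.mem_cons.mp hbb with rfl | hbb'
  · exact Or.inl ⟨p, q, e⟩
  · rcases List.mem_append.mp hbb' with hL | hR
    · split_ifs at hL with h2
      · have hb := spcB_mem_bounds b2j a b alo i blo j bb hL
        refine Or.inr (Or.inl ⟨?_, h2, ⟨bb, hL, p, q, e⟩⟩)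
        have hq : x < ((bb.1 + bb.2.2 : Nat) : Int) := by push_cast; omega
        have : bb.1 + bb.2.2 ≤ i := hb.2.1
        push_cast at hq
        omega
      · simp at hL
    · split_ifs at hR with h3
      · have hb := spcB_mem_bounds b2j a b (i + k) ahi (j + k) bhi bb hR
        refine Or.inr (Or.inr ⟨?_, h3, ⟨bb, hR, p, q, e⟩⟩)
        have : i + k ≤ bb.1 := hb.1
        omega
      · simp at hR

-- the recursion tree's blocks are pairwise disjoint, so 'maps x' is functional
lemma spcB_fun (b2j : PySem.Dict String (List Nat)) (a b : List String) :
    ∀ alo ahi blo bhi x v1 v2, pvMaps (spcB b2j a b alo ahi blo bhi) x v1 →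
      pvMaps (spcB b2j a b alo ahi blo bhi) x v2 → v1 = v2 := by
  intro alo ahi blo bhi
  induction alo, ahi, blo, bhi using spcB.induct b2j a b with
  | case1 alo ahi blo bhi hv i j hflm =>
    intro x v1 v2 hm1 hm2
    rw [spcB_nil_k0 b2j a b hv hflm] at hm1
    simp [pvMaps] at hm1
  | case2 alo ahi blo bhi hv i j k hflm hk ihL ihR =>
    intro x v1 v2 hm1 hm2
    rcases spcB_cases b2j a b hv hflm hk hm1 with ⟨a1, b1, c1⟩ | ⟨a1, b1, c1⟩ | ⟨a1, b1, c1⟩ <;>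
      rcases spcB_cases b2j a b hv hflm hk hm2 with ⟨a2, b2, c2⟩ | ⟨a2, b2, c2⟩ | ⟨a2, b2, c2⟩
    · rw [c1, c2]
    · omega
    · omega
    · omega
    · exact ihL b1 x v1 v2 c1 c2
    · omega
    · omega
    · omega
    · exact ihR b1 x v1 v2 c1 c2
  | case3 alo ahi blo bhi hv =>
    intro x v1 v2 hm1 hm2
    rw [spcB_nil_inv b2j a b hv] at hm1
    simp [pvMaps] at hm1

lemma pvQMeasure_append (l1 l2 : List (Nat × Nat × Nat × Nat)) :
    pvQMeasure (l1 ++ l2) = pvQMeasure l1 + pvQMeasure l2 := by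
  simp [pvQMeasure]

-- the queue loop of get_matching_blocks finds exactly the recursion tree's blocks
lemma pvFlatMap_if_singleton {α β : Type} {c : Prop} [Decidable c] (r : α) (f : α → List β) :
    (if c then [r] else []).flatMap f = if c then f r else [] := by
  split_ifs <;> simp

lemma pvQueueLoop_perm_fuel (b2j : PySem.Dict String (List Nat)) (a b : List String) :
    ∀ (n : Nat) (q : List (Nat × Nat × Nat × Nat)) (acc : List (Nat × Nat × Nat)),
      pvQMeasure q ≤ n → (∀ r ∈ q, r.1 ≤ r.2.1 ∧ r.2.2.1 ≤ r.2.2.2) →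
      (pvQueueLoop b2j a b q acc).Perm
        (acc ++ q.flatMap (fun r => spcB b2j a b r.1 r.2.1 r.2.2.1 r.2.2.2)) := by
  intro n
  induction n with
  | zero =>
    intro q acc hq hval
    match q with
    | [] => rw [pvQueueLoop]; simp
    | (alo, ahi, blo, bhi) :: rest =>
      exfalso
      simp [pvQMeasure, pvRegionSize] at hq
  | succ n ih =>
    intro q acc hq hval
    match q with
    | [] => rw [pvQueueLoop]; simp
    | (alo, ahi, blo, bhi) :: rest =>
      have hvv := hval (alo, ahi, blo, bhi) List.mem_cons_self
      have hA : alo ≤ ahi := hvv.1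
      have hB : blo ≤ bhi := hvv.2
      rw [pvQueueLoop]
      dsimp only
      generalize hflm : pvFLM b2j a b alo ahi blo bhi = r
      obtain ⟨i, j, k⟩ := r
      obtain ⟨B1, B2, B3, B4⟩ := pvFLM_bounds' b2j a b hA hB hflm
      by_cases hk : k ≠ 0
      · rw [if_pos hk]
        have hm : pvQMeasure ((if i + k < ahi ∧ j + k < bhi then [(i + k, ahi, j + k, bhi)] else []) ++
              (if alo < i ∧ blo < j then [(alo, i, blo, j)] else []) ++ rest)
            < pvQMeasure ((alo, ahi, blo, bhi) :: rest) := by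
          rw [pvQMeasure_append, pvQMeasure_append]
          have hmc : pvQMeasure ((alo, ahi, blo, bhi) :: rest)
              = (2 * (ahi - alo) + 1) + pvQMeasure rest := by
            simp [pvQMeasure, pvRegionSize]
          rw [hmc]
          split_ifs <;> simp [pvQMeasure, pvRegionSize] <;> omega
        rw [dif_pos hm]
        have hval' : ∀ r ∈ (if i + k < ahi ∧ j + k < bhi then [(i + k, ahi, j + k, bhi)] else []) ++
              (if alo < i ∧ blo < j then [(alo, i, blo, j)] else []) ++ rest,
            r.1 ≤ r.2.1 ∧ r.2.2.1 ≤ r.2.2.2 := by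
          intro r hr
          rcases List.mem_append.mp hr with hr' | hr'
          · rcases List.mem_append.mp hr' with h2 | h1
            · split_ifs at h2 with hcond
              · simp at h2
                subst h2
                exact ⟨by omega, by omega⟩
              · simp at h2
            · split_ifs at h1 with hcond
              · simp at h1
                subst h1
                exact ⟨by omega, by omega⟩
              · simp at h1
          · exact hval r (List.mem_cons_of_mem _ hr')
        have hq' : pvQMeasure ((if i + k < ahi ∧ j + k < bhi then [(i + k, ahi, j + k, bhi)] else []) ++
              (if alo < i ∧ blo < j then [(alo, i, blo, j)] else []) ++ rest) ≤ n := by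
          have : pvQMeasure ((alo, ahi, blo, bhi) :: rest) ≤ n + 1 := hq
          omega
        refine (ih _ _ hq' hval').trans ?_
        rw [List.flatMap_cons, spcB_cons b2j a b ⟨hA, hB⟩ hflm hk]
        rw [List.flatMap_append, List.flatMap_append, pvFlatMap_if_singleton,
          pvFlatMap_if_singleton]
        simp only [List.append_assoc, List.cons_append, List.singleton_append, List.nil_append]
        apply List.Perm.append_left
        apply List.Perm.cons
        rw [← List.append_assoc, ← List.append_assoc]
        exact List.perm_append_comm.append_right _
      · rw [if_neg hk]
        simp only [ne_eq, not_not] at hk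
        subst hk
        have hq' : pvQMeasure rest ≤ n := by
          have : pvQMeasure ((alo, ahi, blo, bhi) :: rest) ≤ n + 1 := hq
          have h1 : pvQMeasure ((alo, ahi, blo, bhi) :: rest)
              = (2 * (ahi - alo) + 1) + pvQMeasure rest := by
            simp [pvQMeasure, pvRegionSize]
          omega
        refine (ih rest acc hq' (fun r hr => hval r (List.mem_cons_of_mem _ hr))).trans ?_
        rw [List.flatMap_cons, spcB_nil_k0 b2j a b ⟨hA, hB⟩ hflm]
        simp

lemma pvQueueLoop_perm (b2j : PySem.Dict String (List Nat)) (a b : List String)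
    (q : List (Nat × Nat × Nat × Nat)) (acc : List (Nat × Nat × Nat))
    (hval : ∀ r ∈ q, r.1 ≤ r.2.1 ∧ r.2.2.1 ≤ r.2.2.2) :
    (pvQueueLoop b2j a b q acc).Perm
      (acc ++ q.flatMap (fun r => spcB b2j a b r.1 r.2.1 r.2.2.1 r.2.2.2)) :=
  pvQueueLoop_perm_fuel b2j a b (pvQMeasure q) q acc (le_refl _) hval

-- B's descent answers exactly 'some block of the recursion tree maps x'
lemma pvDescend_some_iff (b2j : PySem.Dict String (List Nat)) (a b : List String) (x : Int) :
    ∀ alo ahi blo bhi (v : Int),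
      pvDescend b2j a b x alo ahi blo bhi = some v ↔
        pvMaps (spcB b2j a b alo ahi blo bhi) x v := by
  intro alo ahi blo bhi
  induction alo, ahi, blo, bhi using pvDescend.induct b2j a b x with
  | case1 alo ahi blo bhi hv i j hflm =>
    intro v
    rw [spcB_nil_k0 b2j a b hv hflm, pvDescend, dif_pos hv, hflm]
    simp [pvMaps]
  | case2 alo ahi blo bhi hv i j k hflm hk hin =>
    intro v
    rw [spcB_cons b2j a b hv hflm hk, pvDescend, dif_pos hv, hflm]
    simp only [dif_neg hk, if_pos hin, Option.some.injEq]
    constructor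
    · intro h
      exact ⟨(i, j, k), List.mem_cons_self, hin.1, hin.2, h.symm⟩
    · intro hm
      rcases spcB_cases b2j a b hv hflm hk
          (by rw [spcB_cons b2j a b hv hflm hk]; exact hm) with
        ⟨a1, b1, c1⟩ | ⟨a1, b1, c1⟩ | ⟨a1, b1, c1⟩
      · omega
      · omega
      · omega
  | case3 alo ahi blo bhi hv i j k hflm hk hin hx h2 ih =>
    intro v
    rw [spcB_cons b2j a b hv hflm hk, pvDescend, dif_pos hv, hflm]
    simp only [dif_neg hk, if_neg hin, if_pos hx, dif_pos h2]
    rw [ih v]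
    constructor
    · intro hm
      refine pvMaps_subset ?_ hm
      intro bb hbb
      exact List.mem_cons_of_mem _ (List.mem_append.mpr (Or.inl (by rw [if_pos h2]; exact hbb)))
    · intro hm
      rcases spcB_cases b2j a b hv hflm hk
          (by rw [spcB_cons b2j a b hv hflm hk]; exact hm) with
        ⟨a1, b1, c1⟩ | ⟨a1, b1, c1⟩ | ⟨a1, b1, c1⟩
      · omega
      · exact c1
      · omega
  | case4 alo ahi blo bhi hv i j k hflm hk hin hx h2 =>
    intro v
    rw [spcB_cons b2j a b hv hflm hk, pvDescend, dif_pos hv, hflm]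
    simp only [dif_neg hk, if_neg hin, if_pos hx, dif_neg h2]
    constructor
    · intro h; cases h
    · intro hm
      rcases spcB_cases b2j a b hv hflm hk
          (by rw [spcB_cons b2j a b hv hflm hk]; exact hm) with
        ⟨a1, b1, c1⟩ | ⟨a1, b1, c1⟩ | ⟨a1, b1, c1⟩
      · omega
      · exact absurd b1 h2
      · omega
  | case5 alo ahi blo bhi hv i j k hflm hk hin hx h3 ih =>
    intro v
    rw [spcB_cons b2j a b hv hflm hk, pvDescend, dif_pos hv, hflm]
    simp only [dif_neg hk, if_neg hin, if_neg hx, dif_pos h3]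
    rw [ih v]
    constructor
    · intro hm
      refine pvMaps_subset ?_ hm
      intro bb hbb
      exact List.mem_cons_of_mem _ (List.mem_append.mpr (Or.inr (by rw [if_pos h3]; exact hbb)))
    · intro hm
      rcases spcB_cases b2j a b hv hflm hk
          (by rw [spcB_cons b2j a b hv hflm hk]; exact hm) with
        ⟨a1, b1, c1⟩ | ⟨a1, b1, c1⟩ | ⟨a1, b1, c1⟩
      · omega
      · omega
      · exact c1
  | case6 alo ahi blo bhi hv i j k hflm hk hin hx h3 =>
    intro v
    rw [spcB_cons b2j a b hv hflm hk, pvDescend, dif_pos hv, hflm]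
    simp only [dif_neg hk, if_neg hin, if_neg hx, dif_neg h3]
    constructor
    · intro h; cases h
    · intro hm
      rcases spcB_cases b2j a b hv hflm hk
          (by rw [spcB_cons b2j a b hv hflm hk]; exact hm) with
        ⟨a1, b1, c1⟩ | ⟨a1, b1, c1⟩ | ⟨a1, b1, c1⟩
      · omega
      · omega
      · exact absurd b1 h3
  | case7 alo ahi blo bhi hv =>
    intro v
    rw [spcB_nil_inv b2j a b hv, pvDescend, dif_neg hv]
    simp [pvMaps]

lemma pvMaps_of_perm {L1 L2 : List (Nat × Nat × Nat)} {x v : Int} (hp : L1.Perm L2)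
    (hm : pvMaps L1 x v) : pvMaps L2 x v := by
  obtain ⟨bb, hbb, p⟩ := hm
  exact ⟨bb, hp.mem_iff.mp hbb, p⟩

-- the pointwise bridge between the two ports
lemma pvGet?_eq_descend (rw vw : List String) (x : Int) :
    (build_word_index_mapping vw rw).get? x
      = pvDescend (pvB2J rw) vw rw x 0 vw.length 0 rw.length := by
  rw [pvMapping_eq_locate]
  have hperm := pvQueueLoop_perm (pvB2J rw) vw rw [(0, vw.length, 0, rw.length)] []
    (by
      intro r hr
      simp at hr
      subst hr
      exact ⟨Nat.zero_le _, Nat.zero_le _⟩)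
  have hperm' : (pvQueueLoop (pvB2J rw) vw rw [(0, vw.length, 0, rw.length)] []).Perm
      (spcB (pvB2J rw) vw rw 0 vw.length 0 rw.length) := by
    refine hperm.trans ?_
    simp
  have htrans : ∀ v, pvMaps (pvNonAdjacent vw rw).reverse x v ↔
      pvMaps (spcB (pvB2J rw) vw rw 0 vw.length 0 rw.length) x v := by
    intro v
    have h1 : pvMaps (pvNonAdjacent vw rw).reverse x v ↔ pvMaps (pvNonAdjacent vw rw) x v := by
      constructor
      · exact pvMaps_of_perm (List.reverse_perm _)
      · exact pvMaps_of_perm (List.reverse_perm _).symm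
    rw [h1, pvMaps_iff_mem_pairs, pvPairs_nonAdjacent, ← pvMaps_iff_mem_pairs]
    have hps : (PySem.List.sorted (pvQueueLoop (pvB2J rw) vw rw [(0, vw.length, 0, rw.length)] [])
        (fun t => [t.1, t.2.1, t.2.2]) false).Perm
        (spcB (pvB2J rw) vw rw 0 vw.length 0 rw.length) :=
      (PySem.List.sorted_perm _ _ _).trans hperm'
    exact ⟨pvMaps_of_perm hps, pvMaps_of_perm hps.symm⟩
  cases hd : pvDescend (pvB2J rw) vw rw x 0 vw.length 0 rw.length with
  | some v =>
    have hmapS : pvMaps (spcB (pvB2J rw) vw rw 0 vw.length 0 rw.length) x v :=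
      (pvDescend_some_iff (pvB2J rw) vw rw x 0 vw.length 0 rw.length v).mp hd
    have hmapR : pvMaps (pvNonAdjacent vw rw).reverse x v := (htrans v).mpr hmapS
    obtain ⟨v', hv'⟩ := pvLocate_isSome_of_maps hmapR
    have hv'' : pvMaps (pvNonAdjacent vw rw).reverse x v' := pvLocate_some_maps hv'
    have heq : v' = v :=
      spcB_fun (pvB2J rw) vw rw 0 vw.length 0 rw.length x v' v ((htrans v').mp hv'') hmapS
    rw [hv', heq]
  | none =>
    have hnone : ∀ v, ¬ pvMaps (pvNonAdjacent vw rw).reverse x v := by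
      intro v hm
      have := (pvDescend_some_iff (pvB2J rw) vw rw x 0 vw.length 0 rw.length v).mpr
        ((htrans v).mp hm)
      rw [hd] at this
      cases this
    cases hl : pvLocate x (pvNonAdjacent vw rw).reverse with
    | none => rfl
    | some v => exact absurd (pvLocate_some_maps hl) (hnone v)

-- ===== VERDICT (by name: the statement is the Claim_ definition above) =====
theorem align_indices_spec : Claim_equal_align_indices := by
  intro rw vw eb _
  unfold Spec_align_indices
  simp only [align_indices, align_indices_alt]
  have hfun : (fun (aligned : List Int) (w : Int) =>
        match (build_word_index_mapping vw rw).get? (w - 1) with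
        | some ref_i => aligned ++ [ref_i + 1]
        | none => aligned)
      = (fun (aligned : List Int) (w : Int) =>
        match pvDescend (pvB2J rw) vw rw (w - 1) 0 vw.length 0 rw.length with
        | some r => aligned ++ [r + 1]
        | none => aligned) := by
    funext acc w
    rw [pvGet?_eq_descend]
  rw [hfun]
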